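-- pv_equiv track=rewrite | github.com/2043078895/graduate_english_word_predict | predict_lstm.py | construct_year_prefix_set
-- ===== SOURCE A (Python) =====
-- def construct_year_prefix_set(vocabulary_order_2_indices):
--     vocabulary_order_2_dict={}
--     for wo_index1,wo_index2,wo_index3 in vocabulary_order_2_indices:
--         if  wo_index3 not in  vocabulary_order_2_dict:
--             vocabulary_order_2_dict[wo_index3]=[wo_index1,wo_index2]
--         else :
--             vocabulary_order_2_dict[wo_index3]+=[wo_index1,wo_index2]
--     return vocabulary_order_2_dict
-- ===== SOURCE B (Python) =====
-- def construct_year_prefix_set(vocabulary_order_2_indices):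
--     keys = list(dict.fromkeys(k for _, _, k in vocabulary_order_2_indices))
--     return {k: [v for i1, i2, kk in vocabulary_order_2_indices if kk == k
--                 for v in (i1, i2)]
--             for k in keys}
-- ===== Notes on version B (the rewrite author's own statement) =====
-- stated objective: alternative
-- what changed: Replaces the single-pass insert-or-extend dict accumulation with a two-phase scheme: first dedup the third components in first-occurrence order, then build each group's value by one comprehension scan per key.
import Mathlib
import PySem

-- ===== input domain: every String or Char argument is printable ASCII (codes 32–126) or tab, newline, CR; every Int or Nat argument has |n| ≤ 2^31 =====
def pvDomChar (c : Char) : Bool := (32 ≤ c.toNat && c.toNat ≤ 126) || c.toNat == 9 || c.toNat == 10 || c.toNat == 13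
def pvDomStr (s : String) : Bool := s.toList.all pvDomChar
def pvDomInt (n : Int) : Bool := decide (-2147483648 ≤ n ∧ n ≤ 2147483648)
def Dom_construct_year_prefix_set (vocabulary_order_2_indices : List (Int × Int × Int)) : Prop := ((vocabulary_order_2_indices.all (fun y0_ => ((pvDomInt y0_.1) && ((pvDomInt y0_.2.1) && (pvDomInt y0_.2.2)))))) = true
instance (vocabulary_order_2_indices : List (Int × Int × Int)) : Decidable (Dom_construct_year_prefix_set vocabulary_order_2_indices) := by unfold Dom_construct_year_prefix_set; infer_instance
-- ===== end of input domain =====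

-- B replaces A's single-pass insert-or-extend dict loop by dedup-the-keys then one
-- comprehension scan per key (objective: alternative decomposition, not faster).

-- ===== PORT A =====
def construct_year_prefix_set (vocabulary_order_2_indices : List (Int × Int × Int)) : List (Int × List Int) :=
  (vocabulary_order_2_indices.foldl
    (fun d t =>
      if d.contains t.2.2 = false then
        d.insert t.2.2 [t.1, t.2.1]
      else
        d.modify t.2.2 [] (fun cur => cur ++ [t.1, t.2.1]))
    PySem.Dict.empty).items

-- ===== PORT B =====
def construct_year_prefix_set_alt (vocabulary_order_2_indices : List (Int × Int × Int)) : List (Int × List Int) :=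
  (PySem.List.dedup (vocabulary_order_2_indices.map (fun t => t.2.2))).map
    (fun k => (k, vocabulary_order_2_indices.flatMap
      (fun t => if t.2.2 == k then [t.1, t.2.1] else [])))

-- ===== PRECONDITION & SPEC =====
def Spec_construct_year_prefix_set (vocabulary_order_2_indices : List (Int × Int × Int)) (out : List (Int × List Int)) : Prop := out = construct_year_prefix_set_alt vocabulary_order_2_indices
instance (vocabulary_order_2_indices : List (Int × Int × Int)) (out : List (Int × List Int)) : Decidable (Spec_construct_year_prefix_set vocabulary_order_2_indices out) := by unfold Spec_construct_year_prefix_set; infer_instance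

-- ===== CLAIM (what is proved, stated in full; the proofs are below) =====
def Claim_equal_construct_year_prefix_set : Prop := ∀ (vocabulary_order_2_indices : List (Int × Int × Int)), Dom_construct_year_prefix_set vocabulary_order_2_indices → Spec_construct_year_prefix_set vocabulary_order_2_indices (construct_year_prefix_set vocabulary_order_2_indices)

-- ===== LEMMAS AND PROOFS =====

-- A's branching step is the unconditional modify-with-default step.
theorem pv_step_eq (d : PySem.Dict Int (List Int)) (t : Int × Int × Int) :
    (if d.contains t.2.2 = false then d.insert t.2.2 [t.1, t.2.1]
     else d.modify t.2.2 [] (fun cur => cur ++ [t.1, t.2.1]))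
    = d.modify t.2.2 [] (fun cur => cur ++ [t.1, t.2.1]) := by
  by_cases h : d.contains t.2.2 = false
  · simp [PySem.Dict.modify, PySem.Dict.getD_of_not_contains, h]
  · simp [h]

theorem pv_foldl_step_eq (xs : List (Int × Int × Int)) (d : PySem.Dict Int (List Int)) :
    xs.foldl (fun d t =>
      if d.contains t.2.2 = false then d.insert t.2.2 [t.1, t.2.1]
      else d.modify t.2.2 [] (fun cur => cur ++ [t.1, t.2.1])) d
    = xs.foldl (fun d t => d.modify t.2.2 [] (fun cur => cur ++ [t.1, t.2.1])) d := by
  simp only [pv_step_eq]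

theorem pv_getD_foldl (xs : List (Int × Int × Int)) (c : Int) (d : PySem.Dict Int (List Int)) :
    (xs.foldl (fun d t => d.modify t.2.2 [] (fun cur => cur ++ [t.1, t.2.1])) d).getD c []
    = d.getD c [] ++ xs.flatMap (fun t => if t.2.2 == c then [t.1, t.2.1] else []) := by
  induction xs generalizing d with
  | nil => simp
  | cons t xs ih =>
      simp only [List.foldl_cons, List.flatMap_cons, ih, PySem.Dict.getD_modify]
      by_cases h : t.2.2 = c
      · subst h; simp
      · simp [h, Ne.symm h, beq_iff_eq]

-- ===== VERDICT (by name: the statement is the Claim_ definition above) =====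
theorem construct_year_prefix_set_spec : Claim_equal_construct_year_prefix_set := by
  intro xs _
  show construct_year_prefix_set xs = construct_year_prefix_set_alt xs
  unfold construct_year_prefix_set construct_year_prefix_set_alt
  rw [pv_foldl_step_eq]
  have hnd : (xs.foldl (fun d t => d.modify t.2.2 [] (fun cur => cur ++ [t.1, t.2.1]))
      PySem.Dict.empty).keys.Nodup := by
    exact PySem.Dict.nodup_keys_foldl_modify_key xs (fun t => t.2.2) [] _ _
      (by simp [PySem.Dict.keys_empty])
  rw [PySem.Dict.items_eq_map_keys _ hnd []]
  rw [PySem.Dict.keys_foldl_modify_key]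
  have hkeys : PySem.Set.update (PySem.Dict.empty (κ := Int) (ν := List Int)).keys
      (xs.map (fun t => t.2.2)) = PySem.List.dedup (xs.map (fun t => t.2.2)) := by
    simp [PySem.Set.update, PySem.Dict.keys_empty, PySem.List.dedup_eq_ofList,
      PySem.Set.ofList_eq_foldl]
  rw [hkeys]
  apply List.map_congr_left
  intro k _
  rw [pv_getD_foldl]
  simp
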